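-- pv_equiv track=rewrite | github.com/Marini97/PANACEA | tree.py | comment_to_data
-- ===== SOURCE A (Python) =====
-- def comment_to_data(comment):
--     type, action, cost, role, time = "", "", "", "", ""
--
--     for line in comment.split('\n'):
--         if line.startswith('Type:'):
--             type = line.split(': ')[1]
--         elif line.startswith('Action:'):
--             action = line.split(': ')[1]
--         elif line.startswith('Cost:'):
--             cost = line.split(': ')[1]
--         elif line.startswith('Time:'):
--             time = line.split(': ')[1]
--         elif line.startswith('Role:'):
--             role = line.split(': ')[1]
--
--     return type, action, cost, time, role
-- ===== SOURCE B (Python) =====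
-- def comment_to_data(comment):
--     lines = comment.split('\n')
--
--     def field(prefix):
--         # last assignment wins in A, so the last matching line determines the field
--         for line in reversed(lines):
--             if line.startswith(prefix):
--                 return line.split(': ')[1]
--         return ""
--
--     return (field('Type:'), field('Action:'), field('Cost:'),
--             field('Time:'), field('Role:'))
-- ===== Notes on version B (the rewrite author's own statement) =====
-- stated objective: alternative
-- what changed: Instead of one forward pass threading five mutable variables through an if/elif chain, B runs five independent back-to-front searches, one per field, each returning the first (i.e. last in document order) line with that prefix; correct because the five prefixes are mutually exclusive and later assignments overwrite earlier ones in A.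
import Mathlib
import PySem

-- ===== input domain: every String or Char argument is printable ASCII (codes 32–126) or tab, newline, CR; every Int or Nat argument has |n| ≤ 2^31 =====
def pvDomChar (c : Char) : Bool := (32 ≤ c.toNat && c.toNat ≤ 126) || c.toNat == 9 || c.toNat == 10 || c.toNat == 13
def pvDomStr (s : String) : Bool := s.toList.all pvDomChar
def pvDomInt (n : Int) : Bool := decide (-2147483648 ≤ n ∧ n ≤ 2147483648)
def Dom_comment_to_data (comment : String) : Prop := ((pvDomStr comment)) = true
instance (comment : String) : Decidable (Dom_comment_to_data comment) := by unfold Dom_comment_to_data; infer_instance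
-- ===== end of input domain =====

-- B replaces A's single forward pass threading five variables by five independent
-- back-to-front searches, one per field (alternative decomposition; same cost).

-- ===== PORT A =====
-- line.split(': ')[1]; Pre_ guarantees index 1 exists, so getD "" is never taken
def ctdExtractA (line : String) : String :=
  (PySem.List.pyGet? ((PySem.Str.split? line ": ").getD []) 1).getD ""

def ctdStepA (st : String × String × String × String × String) (line : String) :
    String × String × String × String × String :=
  let (type, action, cost, role, time) := st
  if PySem.Str.startswith line "Type:" then (ctdExtractA line, action, cost, role, time)
  else if PySem.Str.startswith line "Action:" then (type, ctdExtractA line, cost, role, time)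
  else if PySem.Str.startswith line "Cost:" then (type, action, ctdExtractA line, role, time)
  else if PySem.Str.startswith line "Time:" then (type, action, cost, role, ctdExtractA line)
  else if PySem.Str.startswith line "Role:" then (type, action, cost, ctdExtractA line, time)
  else (type, action, cost, role, time)

def comment_to_data (comment : String) : String × String × String × String × String :=
  let r : String × String × String × String × String :=
    ((PySem.Str.split? comment "\n").getD []).foldl ctdStepA ("", "", "", "", "")
  (r.1, r.2.1, r.2.2.1, r.2.2.2.2, r.2.2.2.1)

-- ===== PORT B =====
def ctdExtractB (line : String) : String :=
  (PySem.List.pyGet? ((PySem.Str.split? line ": ").getD []) 1).getD ""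

-- 'for line in reversed(lines): if line.startswith(prefix): return …; return ""'
-- (applied to lines.reverse)
def ctdField : List String → String → String
  | [], _ => ""
  | line :: rest, p =>
    if PySem.Str.startswith line p then ctdExtractB line else ctdField rest p

def comment_to_data_alt (comment : String) : String × String × String × String × String :=
  let lines := (PySem.Str.split? comment "\n").getD []
  (ctdField lines.reverse "Type:", ctdField lines.reverse "Action:",
   ctdField lines.reverse "Cost:", ctdField lines.reverse "Time:",
   ctdField lines.reverse "Role:")

-- ===== PRECONDITION & SPEC =====
-- Pre_ excludes exactly the comments on which A raises IndexError: a line starting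
-- with one of the five field prefixes but containing no ': ' separator.
def Pre_comment_to_data (comment : String) : Prop :=
  ∀ line ∈ (PySem.Str.split? comment "\n").getD [],
    (PySem.Str.startswith line "Type:" || PySem.Str.startswith line "Action:" ||
     PySem.Str.startswith line "Cost:" || PySem.Str.startswith line "Time:" ||
     PySem.Str.startswith line "Role:") = true → PySem.Str.isIn ": " line = true
instance (comment : String) : Decidable (Pre_comment_to_data comment) := by
  unfold Pre_comment_to_data; infer_instance

def pvWitness_comment_to_data : String := "Type: t\nRole: r"

def Spec_comment_to_data (comment : String) (out : String × String × String × String × String) : Prop := out = comment_to_data_alt comment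
instance (comment : String) (out : String × String × String × String × String) : Decidable (Spec_comment_to_data comment out) := by unfold Spec_comment_to_data; infer_instance

-- ===== CLAIM (what is proved, stated in full; the proofs are below) =====
def Claim_equal_comment_to_data : Prop := ∀ (comment : String), Dom_comment_to_data comment → Pre_comment_to_data comment → Spec_comment_to_data comment (comment_to_data comment)

-- ===== LEMMAS AND PROOFS =====

-- ctdField with an explicit default, to absorb A's running state in the induction
def ctdFieldD : List String → String → String → String
  | [], _, d => d
  | line :: rest, p, d =>
    if PySem.Str.startswith line p then ctdExtractB line else ctdFieldD rest p d

theorem ctdField_eq_D (ls : List String) (p : String) :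
    ctdField ls p = ctdFieldD ls p "" := by
  induction ls with
  | nil => rfl
  | cons l r ih => simp [ctdField, ctdFieldD, ih]

-- the five prefixes are pairwise exclusive: no line starts with two of them
theorem sw_excl (x p q : String)
    (h1 : ¬ p.toList <+: q.toList) (h2 : ¬ q.toList <+: p.toList)
    (hp : PySem.Str.startswith x p = true) : PySem.Str.startswith x q = false := by
  by_contra h
  rw [Bool.not_eq_false] at h
  rw [PySem.Str.startswith_eq, PySem.Chars.startswith_iff] at hp h
  rcases List.prefix_or_prefix_of_prefix hp h with hc | hc
  · exact h1 hc
  · exact h2 hc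

theorem ctd_step_eq (x t a c r ti : String) :
    ctdStepA (t, a, c, r, ti) x =
      ((if PySem.Str.startswith x "Type:" then ctdExtractB x else t),
       (if PySem.Str.startswith x "Action:" then ctdExtractB x else a),
       (if PySem.Str.startswith x "Cost:" then ctdExtractB x else c),
       (if PySem.Str.startswith x "Role:" then ctdExtractB x else r),
       (if PySem.Str.startswith x "Time:" then ctdExtractB x else ti)) := by
  by_cases h1 : PySem.Str.startswith x "Type:" = true
  · have e2 := sw_excl x "Type:" "Action:" (by decide) (by decide) h1
    have e3 := sw_excl x "Type:" "Cost:" (by decide) (by decide) h1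
    have e4 := sw_excl x "Type:" "Time:" (by decide) (by decide) h1
    have e5 := sw_excl x "Type:" "Role:" (by decide) (by decide) h1
    simp at h1 e2 e3 e4 e5
    simp [ctdStepA, h1, e2, e3, e4, e5, ctdExtractA, ctdExtractB]
  · by_cases h2 : PySem.Str.startswith x "Action:" = true
    · have e3 := sw_excl x "Action:" "Cost:" (by decide) (by decide) h2
      have e4 := sw_excl x "Action:" "Time:" (by decide) (by decide) h2
      have e5 := sw_excl x "Action:" "Role:" (by decide) (by decide) h2
      simp at h1 h2 e3 e4 e5
      simp [ctdStepA, h1, h2, e3, e4, e5, ctdExtractA, ctdExtractB]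
    · by_cases h3 : PySem.Str.startswith x "Cost:" = true
      · have e4 := sw_excl x "Cost:" "Time:" (by decide) (by decide) h3
        have e5 := sw_excl x "Cost:" "Role:" (by decide) (by decide) h3
        simp at h1 h2 h3 e4 e5
        simp [ctdStepA, h1, h2, h3, e4, e5, ctdExtractA, ctdExtractB]
      · by_cases h4 : PySem.Str.startswith x "Time:" = true
        · have e5 := sw_excl x "Time:" "Role:" (by decide) (by decide) h4
          simp at h1 h2 h3 h4 e5
          simp [ctdStepA, h1, h2, h3, h4, e5, ctdExtractA, ctdExtractB]
        · by_cases h5 : PySem.Str.startswith x "Role:" = true <;>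
          · simp at h1 h2 h3 h4 h5
            simp [ctdStepA, h1, h2, h3, h4, h5, ctdExtractA, ctdExtractB]

theorem foldl_eq_fields (lines : List String) (st : String × String × String × String × String) :
    lines.foldl ctdStepA st =
      (ctdFieldD lines.reverse "Type:" st.1,
       ctdFieldD lines.reverse "Action:" st.2.1,
       ctdFieldD lines.reverse "Cost:" st.2.2.1,
       ctdFieldD lines.reverse "Role:" st.2.2.2.1,
       ctdFieldD lines.reverse "Time:" st.2.2.2.2) := by
  induction lines using List.reverseRecOn generalizing st with
  | nil => rfl
  | append_singleton l x ih =>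
    obtain ⟨t, a, c, r, ti⟩ := st
    rw [List.foldl_append, List.foldl_cons, List.foldl_nil, ih, ctd_step_eq,
      List.reverse_append]
    simp only [List.reverse_singleton, List.singleton_append, ctdFieldD]

theorem comment_to_data_spec : Claim_equal_comment_to_data := by
  intro comment _ _
  simp only [Spec_comment_to_data, comment_to_data, comment_to_data_alt]
  rw [foldl_eq_fields, ctdField_eq_D, ctdField_eq_D, ctdField_eq_D, ctdField_eq_D, ctdField_eq_D]
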